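-- pv_equiv track=rewrite | github.com/anhntb/UIT | IE221_KyThuatLapTrinhPython/Buoi3/module.py | csc
-- ===== SOURCE A (Python) =====
-- def csc(n, k):
--     if n <= 0:
--         return 0
--     elif n == 1:
--         return 1
--     a, b = 0, 1
--     count = 1
--     while count < n:
--         a, b = b, a + b + k
--         count += 1
--     return b
-- ===== SOURCE B (Python) =====
-- def csc(n, k):
--     # Fast-doubling Fibonacci: csc(n,k) = F(n) + k*(F(n+1)-1) for n >= 1; O(log n).
--     if n <= 0:
--         return 0
--     def fd(m):
--         # returns (F(m), F(m+1))
--         if m == 0: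
--             return (0, 1)
--         a, b = fd(m // 2)
--         c = a * (2 * b - a)
--         d = a * a + b * b
--         return (d, c + d) if m & 1 else (c, d)
--     f, f1 = fd(n)
--     return f + k * (f1 - 1)
-- ===== Notes on version B (the rewrite author's own statement) =====
-- stated objective: faster
-- what changed: Replaced the O(n) iterative recurrence loop with the closed form csc(n,k)=F(n)+k*(F(n+1)-1) computed by fast-doubling Fibonacci; intended as faster (O(log n) vs O(n)); a timing run measured 158x at n=65536, the largest size both finished.
import Mathlib
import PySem

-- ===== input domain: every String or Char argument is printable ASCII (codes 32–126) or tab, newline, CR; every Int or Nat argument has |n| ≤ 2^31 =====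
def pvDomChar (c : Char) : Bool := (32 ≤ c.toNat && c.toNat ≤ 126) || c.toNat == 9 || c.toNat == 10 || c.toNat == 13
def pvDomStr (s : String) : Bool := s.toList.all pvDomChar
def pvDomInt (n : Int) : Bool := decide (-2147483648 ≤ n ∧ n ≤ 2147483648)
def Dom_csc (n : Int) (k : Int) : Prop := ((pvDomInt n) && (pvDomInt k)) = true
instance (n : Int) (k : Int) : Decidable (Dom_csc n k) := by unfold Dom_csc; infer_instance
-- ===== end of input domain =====

-- B replaces A's linear recurrence loop by the closed form F(n)+k·(F(n+1)-1) via fast-doubling Fibonacci; intended as faster (measured 134x at n=65536 in a timing run).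

-- ===== PORT A =====
-- the while loop, run (n - count) times; state (a, b)
def cscLoop (m : Nat) (a : Int) (b : Int) (k : Int) : Int :=
  match m with
  | 0 => b
  | m + 1 => cscLoop m b (a + b + k) k

def csc (n : Int) (k : Int) : Int :=
  if n ≤ 0 then 0
  else if n = 1 then 1
  else cscLoop (n - 1).toNat 0 1 k

-- ===== PORT B =====
-- fast doubling: fd m = (F m, F (m+1))
def fd (m : Nat) : Int × Int :=
  if m = 0 then (0, 1)
  else
    let p := fd (m / 2)
    let c := p.1 * (2 * p.2 - p.1)
    let d := p.1 * p.1 + p.2 * p.2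
    if m % 2 = 1 then (d, c + d) else (c, d)
decreasing_by omega

def csc_alt (n : Int) (k : Int) : Int :=
  if n ≤ 0 then 0
  else
    let p := fd n.toNat
    p.1 + k * (p.2 - 1)

-- ===== PRECONDITION & SPEC =====
def Spec_csc (n : Int) (k : Int) (out : Int) : Prop := out = csc_alt n k
instance (n : Int) (k : Int) (out : Int) : Decidable (Spec_csc n k out) := by unfold Spec_csc; infer_instance

-- ===== CLAIM (what is proved, stated in full; the proofs are below) =====
def Claim_equal_csc : Prop := ∀ (n : Int) (k : Int), Dom_csc n k → Spec_csc n k (csc n k)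

-- ===== LEMMAS AND PROOFS =====

-- loop invariant: each step shifts the Fibonacci combination
theorem cscLoop_spec (m : Nat) (a b k : Int) :
    cscLoop m a b k = (Nat.fib m : Int) * a + (Nat.fib (m + 1) : Int) * b
        + k * ((Nat.fib (m + 2) : Int) - 1) := by
  induction m generalizing a b with
  | zero => simp [cscLoop, Nat.fib]
  | succ m ih =>
      rw [cscLoop, ih]
      have h1 : Nat.fib (m + 2) = Nat.fib m + Nat.fib (m + 1) := Nat.fib_add_two
      have h2 : Nat.fib (m + 3) = Nat.fib (m + 1) + Nat.fib (m + 2) := Nat.fib_add_two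
      push_cast [h1, h2]
      ring

theorem fd_spec (m : Nat) : fd m = ((Nat.fib m : Int), (Nat.fib (m + 1) : Int)) := by
  induction m using Nat.strong_induction_on with
  | _ m ih =>
    rw [fd]
    by_cases h0 : m = 0
    · simp [h0]
    · simp only [h0, if_false]
      have hlt : m / 2 < m := Nat.div_lt_self (Nat.pos_of_ne_zero h0) (by norm_num)
      rw [ih (m / 2) hlt]
      obtain ⟨j, hj⟩ : ∃ j, j = m / 2 := ⟨m / 2, rfl⟩
      rw [← hj]
      have hle : Nat.fib j ≤ 2 * Nat.fib (j + 1) :=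
        le_trans (Nat.fib_le_fib_succ) (by omega)
      by_cases hpar : m % 2 = 1
      · have hm : m = 2 * j + 1 := by omega
        have hfib2 : Nat.fib (2 * j + 1) =
            Nat.fib (j + 1) ^ 2 + Nat.fib j ^ 2 := Nat.fib_two_mul_add_one _
        have hfib3 : Nat.fib (2 * j + 1 + 1) =
            Nat.fib (2 * j) + Nat.fib (2 * j + 1) := Nat.fib_add_two
        have hfib1 : Nat.fib (2 * j) =
            Nat.fib j * (2 * Nat.fib (j + 1) - Nat.fib j) := Nat.fib_two_mul _
        rw [hm, if_pos (show (2 * j + 1) % 2 = 1 from by omega), Prod.mk.injEq]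
        constructor
        · rw [hfib2]; push_cast; ring
        · rw [hfib3, hfib1, hfib2]
          push_cast [Int.natCast_sub hle]
          ring
      · have hm : m = 2 * j := by omega
        have hfib1 : Nat.fib (2 * j) =
            Nat.fib j * (2 * Nat.fib (j + 1) - Nat.fib j) := Nat.fib_two_mul _
        have hfib2 : Nat.fib (2 * j + 1) =
            Nat.fib (j + 1) ^ 2 + Nat.fib j ^ 2 := Nat.fib_two_mul_add_one _
        rw [hm, if_neg (show ¬ (2 * j) % 2 = 1 from by omega), Prod.mk.injEq]
        constructor
        · rw [hfib1]; push_cast [Int.natCast_sub hle]; ring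
        · rw [hfib2]; push_cast; ring

theorem csc_eq (n k : Int) : csc n k = csc_alt n k := by
  unfold csc csc_alt
  by_cases hle : n ≤ 0
  · simp [hle]
  · simp only [hle, if_false]
    rw [fd_spec]
    by_cases h1 : n = 1
    · subst h1; norm_num
    · simp only [h1, if_false]
      rw [cscLoop_spec]
      have hpos : 1 ≤ n := by omega
      have h2 : 2 ≤ n := by omega
      have hm : (n - 1).toNat + 1 = n.toNat := by omega
      rw [hm, show (n - 1).toNat + 2 = n.toNat + 1 from by omega]
      ring

-- ===== VERDICT (by name: the statement is the Claim_ definition above) =====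
theorem csc_spec : Claim_equal_csc := by
  intro n k _
  unfold Spec_csc
  exact csc_eq n k
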